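-- pv_equiv track=rewrite | github.com/wguesdon/markdown2resume | check_typos.py | find_error_in_markdown
-- ===== SOURCE A (Python) =====
-- def find_error_in_markdown(error_text, md_content):
--     """Find the line numbers where an error appears in markdown content."""
--     lines = md_content.split("\n")
--     occurrences = []
--
--     for i, line in enumerate(lines, 1):
--         if error_text in line:
--             occurrences.append((i, line.strip()))
--
--     if not occurrences:
--         error_lower = error_text.lower()
--         for i, line in enumerate(lines, 1):
--             if error_lower in line.lower():
--                 occurrences.append((i, line.strip()))
--
--     return occurrences
-- ===== SOURCE B (Python) =====
-- def find_error_in_markdown(error_text, md_content):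
--     """Find the line numbers where an error appears in markdown content."""
--     error_lower = error_text.lower()
--     strict = []
--     loose = []
--     for i, line in enumerate(md_content.split("\n"), 1):
--         if error_text in line:
--             strict.append((i, line.strip()))
--         if error_lower in line.lower():
--             loose.append((i, line.strip()))
--     return strict if strict else loose
-- ===== Notes on version B (the rewrite author's own statement) =====
-- stated objective: alternative
-- what changed: B makes a single pass over the enumerated lines, building the case-sensitive and case-insensitive occurrence lists simultaneously and choosing between them afterwards, instead of A's conditional second full scan.
import Mathlib
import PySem

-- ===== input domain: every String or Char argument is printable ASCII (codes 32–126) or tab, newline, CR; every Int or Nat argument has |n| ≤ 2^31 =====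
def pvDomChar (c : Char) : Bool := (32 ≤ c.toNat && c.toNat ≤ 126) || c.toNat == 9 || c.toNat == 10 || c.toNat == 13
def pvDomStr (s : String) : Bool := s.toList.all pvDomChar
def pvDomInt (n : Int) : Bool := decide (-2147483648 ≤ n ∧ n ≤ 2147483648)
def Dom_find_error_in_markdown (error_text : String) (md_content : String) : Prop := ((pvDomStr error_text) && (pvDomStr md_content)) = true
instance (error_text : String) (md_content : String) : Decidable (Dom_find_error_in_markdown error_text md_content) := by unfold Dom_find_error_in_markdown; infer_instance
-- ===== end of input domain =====

-- B replaces A's conditional second scan by one pass that builds the case-sensitive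
-- and case-insensitive occurrence lists together and picks between them afterwards
-- (alternative decomposition; same cost).

-- ===== PORT A =====
def find_error_in_markdown (error_text : String) (md_content : String) : List (Int × String) :=
  let lines := (PySem.Str.split? md_content "\n").getD []   -- sep "\n" ≠ "", so split? is always some
  let occurrences := (PySem.List.enumerate lines 1).foldl
    (fun acc p =>
      if PySem.Str.isIn error_text p.2 then acc ++ [(p.1, PySem.Str.strip p.2)] else acc) []
  if occurrences = [] then
    let error_lower := PySem.Str.lower error_text
    (PySem.List.enumerate lines 1).foldl
      (fun acc p =>
        if PySem.Str.isIn error_lower (PySem.Str.lower p.2) then acc ++ [(p.1, PySem.Str.strip p.2)] else acc) []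
  else occurrences

-- ===== PORT B =====
def find_error_in_markdown_alt (error_text : String) (md_content : String) : List (Int × String) :=
  let error_lower := PySem.Str.lower error_text
  let r := (PySem.List.enumerate ((PySem.Str.split? md_content "\n").getD []) 1).foldl
    (fun (acc : List (Int × String) × List (Int × String)) q =>
      ((if PySem.Str.isIn error_text q.2 then acc.1 ++ [(q.1, PySem.Str.strip q.2)] else acc.1),
       (if PySem.Str.isIn error_lower (PySem.Str.lower q.2) then acc.2 ++ [(q.1, PySem.Str.strip q.2)] else acc.2)))
    ([], [])
  if r.1 = [] then r.2 else r.1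

-- ===== PRECONDITION & SPEC =====
def Spec_find_error_in_markdown (error_text : String) (md_content : String) (out : List (Int × String)) : Prop := out = find_error_in_markdown_alt error_text md_content
instance (error_text : String) (md_content : String) (out : List (Int × String)) : Decidable (Spec_find_error_in_markdown error_text md_content out) := by unfold Spec_find_error_in_markdown; infer_instance

-- ===== CLAIM (what is proved, stated in full; the proofs are below) =====
def Claim_equal_find_error_in_markdown : Prop := ∀ (error_text : String) (md_content : String), Dom_find_error_in_markdown error_text md_content → Spec_find_error_in_markdown error_text md_content (find_error_in_markdown error_text md_content)

-- ===== LEMMAS AND PROOFS =====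

-- B's paired fold is the pair of A's two independent folds.
theorem pv_pair_foldl (error_text error_lower : String)
    (l : List (Int × String)) (b c : List (Int × String)) :
    l.foldl (fun (acc : List (Int × String) × List (Int × String)) q =>
      ((if PySem.Str.isIn error_text q.2 then acc.1 ++ [(q.1, PySem.Str.strip q.2)] else acc.1),
       (if PySem.Str.isIn error_lower (PySem.Str.lower q.2) then acc.2 ++ [(q.1, PySem.Str.strip q.2)] else acc.2)))
      (b, c) =
      (l.foldl (fun acc p =>
          if PySem.Str.isIn error_text p.2 then acc ++ [(p.1, PySem.Str.strip p.2)] else acc) b,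
       l.foldl (fun acc p =>
          if PySem.Str.isIn error_lower (PySem.Str.lower p.2) then acc ++ [(p.1, PySem.Str.strip p.2)] else acc) c) := by
  induction l generalizing b c with
  | nil => rfl
  | cons x t ih => simp only [List.foldl]; rw [ih]

-- ===== VERDICT (by name: the statement is the Claim_ definition above) =====
theorem find_error_in_markdown_spec : Claim_equal_find_error_in_markdown := by
  intro error_text md_content _
  unfold Spec_find_error_in_markdown find_error_in_markdown find_error_in_markdown_alt
  simp only [pv_pair_foldl]
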